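-- pv_equiv track=rewrite | github.com/jsuci/gidapp | stl/script_find_pairs_v2.py | match_results
-- ===== SOURCE A (Python) =====
-- def match_results(num_one, num_two):
--     output = []
--
--     if len(num_one) == 3:
--         for digit in num_one:
--             if digit in num_two:
--                 output.append(digit)
--                 num_two = num_two.replace(digit, "", 1)
--
--     len_out = len(output)
--
--     if len_out:
--         return "".join(sorted(output))
--     else:
--         return None
-- ===== SOURCE B (Python) =====
-- def match_results(num_one, num_two):
--     if len(num_one) != 3:
--         return None
--     common = []
--     for c in sorted(set(num_one)):
--         common += c * min(num_one.count(c), num_two.count(c))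
--     return "".join(common) if common else None
-- ===== Notes on version B (the rewrite author's own statement) =====
-- stated objective: simpler
-- what changed: Replaces the greedy scan that mutates num_two with str.replace by a count-based multiset intersection: for each distinct digit of num_one in sorted order, emit min(count in num_one, count in num_two) copies, so no mutation or per-character replace pass and no final sort of the output.
import Mathlib
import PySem

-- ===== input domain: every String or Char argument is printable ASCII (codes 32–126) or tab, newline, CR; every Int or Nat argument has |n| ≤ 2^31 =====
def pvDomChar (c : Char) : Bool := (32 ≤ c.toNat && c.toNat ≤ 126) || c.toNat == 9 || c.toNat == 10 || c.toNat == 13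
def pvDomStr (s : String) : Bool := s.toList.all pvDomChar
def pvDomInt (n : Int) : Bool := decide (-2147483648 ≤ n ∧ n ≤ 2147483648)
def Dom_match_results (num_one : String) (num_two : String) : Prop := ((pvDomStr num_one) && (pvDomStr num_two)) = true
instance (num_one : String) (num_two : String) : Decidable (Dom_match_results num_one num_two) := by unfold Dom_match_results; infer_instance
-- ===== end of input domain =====

-- B replaces A's greedy scan (which mutates num_two with replace) by a count-based
-- multiset intersection built directly in sorted order; objective: simpler.

-- ===== PORT A =====
-- the for-loop over num_one with mutable (output, num_two);
-- 'digit in num_two' for a single char is char membership, and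
-- num_two.replace(digit, "", 1) removes the first occurrence of that char = List.erase
def matchLoop : List Char → List Char → List Char → List Char × List Char
  | [], output, n2 => (output, n2)
  | d :: ds, output, n2 =>
    if d ∈ n2 then matchLoop ds (output ++ [d]) (n2.erase d)
    else matchLoop ds output n2

def match_results (num_one : String) (num_two : String) : Option String :=
  let st :=
    if num_one.toList.length = 3 then matchLoop num_one.toList [] num_two.toList
    else ([], num_two.toList)
  let output := st.1
  if output.length ≠ 0 then
    some (String.ofList (PySem.List.sorted output (fun c => c) false))
  else
    none

-- ===== PORT B =====
def match_results_alt (num_one : String) (num_two : String) : Option String :=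
  if num_one.toList.length ≠ 3 then none
  else
    let common :=
      (PySem.List.sorted (PySem.Set.ofList num_one.toList) (fun c => c) false).foldl
        (fun acc c =>
          acc ++ List.replicate (min (num_one.toList.count c) (num_two.toList.count c)) c) []
    if common = [] then none else some (String.ofList common)

-- ===== PRECONDITION & SPEC =====
def Spec_match_results (num_one : String) (num_two : String) (out : Option String) : Prop := out = match_results_alt num_one num_two
instance (num_one : String) (num_two : String) (out : Option String) : Decidable (Spec_match_results num_one num_two out) := by unfold Spec_match_results; infer_instance

-- ===== CLAIM (what is proved, stated in full; the proofs are below) =====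
def Claim_equal_match_results : Prop := ∀ (num_one : String) (num_two : String), Dom_match_results num_one num_two → Spec_match_results num_one num_two (match_results num_one num_two)

-- ===== LEMMAS AND PROOFS =====

-- the greedy loop collects, for each character, min(count in remaining input, count in pool)
theorem count_matchLoop (ds out n2 : List Char) (c : Char) :
    ((matchLoop ds out n2).1).count c = out.count c + min (ds.count c) (n2.count c) := by
  induction ds generalizing out n2 with
  | nil => simp [matchLoop]
  | cons d ds ih =>
    by_cases hd : d ∈ n2
    · have h1 : 1 ≤ n2.count d := List.count_pos_iff.mpr hd
      rw [matchLoop, if_pos hd, ih]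
      by_cases hc : c = d
      · subst hc
        simp [List.count_append, List.count_cons_self, List.count_erase_self]
        omega
      · have hdc : ¬ d = c := fun h => hc h.symm
        simp [List.count_append, List.count_erase_of_ne hc, hdc]
    · have h0 : n2.count d = 0 := List.count_eq_zero.mpr hd
      rw [matchLoop, if_neg hd, ih]
      by_cases hc : c = d
      · subst hc; simp [List.count_cons_self, h0]
      · have hdc : ¬ d = c := fun h => hc h.symm
        simp [hdc]

def bCommon (one two : List Char) : List Char :=
  (PySem.List.sorted (PySem.Set.ofList one) (fun c => c) false).foldl
    (fun acc c => acc ++ List.replicate (min (one.count c) (two.count c)) c) []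

theorem bCommon_eq_flatMap (one two : List Char) :
    bCommon one two
      = (PySem.List.sorted (PySem.Set.ofList one) (fun c => c) false).flatMap
          (fun c => List.replicate (min (one.count c) (two.count c)) c) := by
  unfold bCommon
  rw [PySem.List.foldl_append_eq_flatMap]
  simp

theorem count_flatMap_replicate (m : Char → Nat) (l : List Char) (hnd : l.Nodup) (c : Char) :
    (l.flatMap (fun x => List.replicate (m x) x)).count c = if c ∈ l then m c else 0 := by
  induction l with
  | nil => simp
  | cons a l ih =>
    obtain ⟨ha, hnd'⟩ := List.nodup_cons.mp hnd
    simp only [List.flatMap_cons, List.count_append, List.count_replicate, ih hnd']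
    by_cases hca : c = a
    · subst hca
      simp [ha]
    · have hac : ¬ a = c := fun h => hca h.symm
      simp [hca, hac]

theorem count_bCommon (one two : List Char) (c : Char) :
    (bCommon one two).count c = min (one.count c) (two.count c) := by
  rw [bCommon_eq_flatMap]
  have hnd : (PySem.List.sorted (PySem.Set.ofList one) (fun c => c) false).Nodup := by
    have := PySem.List.sorted_ofList_pairwise_lt (xs := one)
    exact this.imp (fun h => ne_of_lt h)
  have hmem : c ∈ PySem.List.sorted (PySem.Set.ofList one) (fun c => c) false ↔ c ∈ one := by
    rw [PySem.List.mem_sorted, PySem.Set.mem_ofList]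
  rw [count_flatMap_replicate _ _ hnd c]
  by_cases hc : c ∈ one
  · rw [if_pos (hmem.mpr hc)]
  · rw [if_neg (fun h => hc (hmem.mp h))]
    have h0 : one.count c = 0 := List.count_eq_zero.mpr hc
    simp [h0]

theorem pairwise_flatMap_replicate (m : Char → Nat) (l : List Char)
    (h : l.Pairwise (· < ·)) :
    (l.flatMap (fun x => List.replicate (m x) x)).Pairwise (· ≤ ·) := by
  induction l with
  | nil => simp
  | cons a l ih =>
    obtain ⟨ha, h'⟩ := List.pairwise_cons.mp h
    simp only [List.flatMap_cons]
    rw [List.pairwise_append]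
    refine ⟨List.pairwise_replicate.mpr (Or.inr le_rfl), ih h', ?_⟩
    intro x hx y hy
    have hxa : x = a := List.eq_of_mem_replicate hx
    obtain ⟨b, hb, hyb⟩ := List.mem_flatMap.mp hy
    have hyb' : y = b := List.eq_of_mem_replicate hyb
    subst hxa; subst hyb'
    exact le_of_lt (ha y hb)

theorem bCommon_pairwise (one two : List Char) :
    (bCommon one two).Pairwise (· ≤ ·) := by
  rw [bCommon_eq_flatMap]
  exact pairwise_flatMap_replicate _ _ (PySem.List.sorted_ofList_pairwise_lt (xs := one))

theorem bCommon_perm (one two : List Char) :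
    (bCommon one two).Perm (matchLoop one [] two).1 := by
  rw [List.perm_iff_count]
  intro c
  rw [count_bCommon, count_matchLoop]
  simp

theorem sorted_out_eq_bCommon (one two : List Char) :
    PySem.List.sorted (matchLoop one [] two).1 (fun c => c) false = bCommon one two :=
  PySem.List.sorted_id_eq_of_perm_of_pairwise _ _ (bCommon_perm one two) (bCommon_pairwise one two)

-- ===== VERDICT (by name: the statement is the Claim_ definition above) =====
theorem match_results_spec : Claim_equal_match_results := by
  intro num_one num_two _
  unfold Spec_match_results match_results match_results_alt
  by_cases h3 : num_one.toList.length = 3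
  · simp only [h3, if_neg (by simp : ¬ (3 : Nat) ≠ 3), if_true]
    have hfold : List.foldl
        (fun acc c => acc ++ List.replicate (min (List.count c num_one.toList) (List.count c num_two.toList)) c) []
        (PySem.List.sorted (PySem.Set.ofList num_one.toList) fun c => c)
        = bCommon num_one.toList num_two.toList := rfl
    rw [hfold]
    have hkey := sorted_out_eq_bCommon num_one.toList num_two.toList
    have hperm := bCommon_perm num_one.toList num_two.toList
    have hlen : (bCommon num_one.toList num_two.toList).length
        = (matchLoop num_one.toList [] num_two.toList).1.length := hperm.length_eq
    by_cases hout : (matchLoop num_one.toList [] num_two.toList).1.length ≠ 0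
    · have hne : ¬ (bCommon num_one.toList num_two.toList = []) := by
        intro h; apply hout; rw [← hlen, h]; rfl
      rw [if_pos hout, if_neg hne, hkey]
    · have heq : bCommon num_one.toList num_two.toList = [] := by
        apply List.eq_nil_of_length_eq_zero
        rw [hlen]; omega
      rw [if_neg hout, if_pos heq]
  · simp only [if_neg h3, if_pos h3]
    simp
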